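-- pv_equiv track=rewrite | github.com/shimpe/mints | common.py | make_inversion
-- ===== SOURCE A (Python) =====
-- def make_inversion(notes, inversion):
--     if not notes:
--         return notes
--
--     if inversion == 0:
--         return notes
--     else:
--         for x in range(inversion):
--             firstnote = notes[0]
--             l = notes[1:]
--             l.append(firstnote+"'")
--             notes = l
--         return notes
-- ===== SOURCE B (Python) =====
-- def make_inversion(notes, inversion):
--     n = len(notes)
--     if n == 0 or inversion <= 0:
--         return notes
--     return [notes[(j + inversion) % n] + "'" * ((inversion - (j + inversion) % n + n - 1) // n)
--             for j in range(n)]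
-- ===== Notes on version B (the rewrite author's own statement) =====
-- stated objective: faster
-- what changed: Replaced the inversion-many rotate-and-append passes by a single closed-form pass: output slot j is notes[(j+inversion)%n] suffixed with ceil((inversion-i)/n) primes, built in one list comprehension.
import Mathlib
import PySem

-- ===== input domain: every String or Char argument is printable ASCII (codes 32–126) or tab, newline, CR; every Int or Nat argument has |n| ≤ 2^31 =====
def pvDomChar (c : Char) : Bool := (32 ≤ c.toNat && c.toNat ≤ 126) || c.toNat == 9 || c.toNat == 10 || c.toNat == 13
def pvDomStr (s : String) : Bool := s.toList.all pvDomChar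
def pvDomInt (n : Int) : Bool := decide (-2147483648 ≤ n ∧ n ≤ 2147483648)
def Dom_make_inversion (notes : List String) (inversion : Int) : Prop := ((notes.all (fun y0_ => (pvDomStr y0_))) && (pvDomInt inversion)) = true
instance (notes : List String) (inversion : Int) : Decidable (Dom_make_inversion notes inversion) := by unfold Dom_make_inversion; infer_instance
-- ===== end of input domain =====

-- B replaces A's inversion-many rotate-and-append passes by one closed-form pass (asymptotically faster).

-- ===== PORT A =====
-- one iteration of A's for-loop body: firstnote = notes[0]; l = notes[1:]; l.append(firstnote+"'"); notes = l
-- (the [] case is unreachable: A only runs the loop on a non-empty list, which stays non-empty)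
def aStep (notes : List String) : List String :=
  match notes with
  | [] => []
  | f :: rest => rest ++ [f ++ "'"]

def make_inversion (notes : List String) (inversion : Int) : List String :=
  if notes = [] then notes
  else if inversion = 0 then notes
  else (PySem.List.pyRange 0 inversion 1).foldl (fun acc _ => aStep acc) notes

-- ===== PORT B =====
def make_inversion_alt (notes : List String) (inversion : Int) : List String :=
  let n : Int := notes.length
  if n = 0 ∨ inversion ≤ 0 then notes
  else (PySem.List.pyRange 0 n 1).map (fun j =>
    let i := PySem.Int.mod (j + inversion) n
    PySem.List.pyGetD notes i "" ++
      String.ofList (PySem.List.pyRepeat ['\''] (PySem.Int.floordiv (inversion - i + n - 1) n)))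

-- ===== PRECONDITION & SPEC =====
def Spec_make_inversion (notes : List String) (inversion : Int) (out : List String) : Prop := out = make_inversion_alt notes inversion
instance (notes : List String) (inversion : Int) (out : List String) : Decidable (Spec_make_inversion notes inversion out) := by unfold Spec_make_inversion; infer_instance

-- ===== CLAIM (what is proved, stated in full; the proofs are below) =====
def Claim_equal_make_inversion : Prop := ∀ (notes : List String) (inversion : Int), Dom_make_inversion notes inversion → Spec_make_inversion notes inversion (make_inversion notes inversion)

-- ===== LEMMAS AND PROOFS =====

-- closed form on the Nat side: slot j holds notes[(j+k)%n] with (k+n-1-i)/n primes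
def gOut (l : List String) (k : Nat) : List String :=
  (List.range l.length).map (fun j =>
    l.getD ((j + k) % l.length) "" ++
      String.ofList (List.replicate ((k + l.length - 1 - (j + k) % l.length) / l.length) '\''))

theorem foldl_const {α β : Type} (f : α → α) (l : List β) (init : α) :
    l.foldl (fun a _ => f a) init = f^[l.length] init := by
  induction l generalizing init with
  | nil => rfl
  | cons x xs ih => simp [List.foldl, ih, Function.iterate_succ_apply]

theorem primes_split {n k i : ℕ} (hn : 0 < n) (hi : i < n) :
    (k + n - 1 - i) / n = k / n + if i < k % n then 1 else 0 := by
  have hdm := Nat.div_add_mod k n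
  set q := k / n with hq
  set r := k % n with hr
  have hrlt : r < n := Nat.mod_lt _ hn
  have hsplit : k + n - 1 - i = n * q + (r + n - 1 - i) := by omega
  rw [hsplit, Nat.mul_add_div hn]
  congr 1
  by_cases h : i < r
  · have : r + n - 1 - i = n + (r - 1 - i) := by omega
    rw [this, Nat.add_div_left _ hn, Nat.div_eq_of_lt (by omega)]
    simp [h]
  · rw [Nat.div_eq_of_lt (by omega)]
    simp [h]

theorem primes_succ_split {n k i : ℕ} (hn : 0 < n) (hi : i < n) :
    (k + 1 + n - 1 - i) / n = k / n + if i ≤ k % n then 1 else 0 := by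
  have hdm := Nat.div_add_mod k n
  set q := k / n with hq
  set r := k % n with hr
  have hrlt : r < n := Nat.mod_lt _ hn
  have hsplit : k + 1 + n - 1 - i = n * q + (r + n - i) := by omega
  rw [hsplit, Nat.mul_add_div hn]
  congr 1
  by_cases h : i ≤ r
  · have : r + n - i = n + (r - i) := by omega
    rw [this, Nat.add_div_left _ hn, Nat.div_eq_of_lt (by omega)]
    simp [h]
  · rw [Nat.div_eq_of_lt (by omega)]
    simp [h]

theorem mod_ne_of_mid {n k j : ℕ} (h1 : 0 < j) (h2 : j < n) :
    (j + k) % n ≠ k % n := by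
  have hn : 0 < n := by omega
  intro h
  rw [Nat.add_mod, Nat.mod_eq_of_lt h2] at h
  have hr : k % n < n := Nat.mod_lt _ hn
  by_cases hlt : j + k % n < n
  · rw [Nat.mod_eq_of_lt hlt] at h; omega
  · rw [Nat.mod_eq_sub_mod (by omega), Nat.mod_eq_of_lt (by omega)] at h; omega

theorem gOut_zero (l : List String) : gOut l 0 = l := by
  unfold gOut
  apply List.ext_getElem
  · simp
  · intro i h1 h2
    simp only [List.getElem_map, List.getElem_range]
    have hi : i < l.length := by simpa using h2
    rw [Nat.mod_eq_of_lt (by simpa using hi), Nat.div_eq_of_lt (by omega)]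
    simp [List.getElem?_eq_getElem hi]

theorem aStep_gOut (l : List String) (k : ℕ) (hl : l ≠ []) :
    aStep (gOut l k) = gOut l (k + 1) := by
  obtain ⟨m, hm⟩ : ∃ m, l.length = m + 1 := by
    cases l with
    | nil => exact absurd rfl hl
    | cons a as => exact ⟨as.length, rfl⟩
  have hn : 0 < l.length := by omega
  unfold gOut
  rw [hm]
  conv_lhs => rw [List.range_succ_eq_map]
  conv_rhs => rw [List.range_succ]
  simp only [List.map_cons, List.map_append, List.map_map, List.map_cons, List.map_nil]
  rw [aStep]
  congr 1
  · -- shifted middle elements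
    apply List.map_congr_left
    intro j hj
    have hj' : j < m := List.mem_range.mp hj
    simp only [Function.comp]
    have e1 : j + (k + 1) = Nat.succ j + k := by omega
    rw [e1]
    congr 2
    rw [← hm]
    have hne : (Nat.succ j + k) % l.length ≠ k % l.length :=
      mod_ne_of_mid (by omega) (by omega)
    have hilt : (Nat.succ j + k) % l.length < l.length := Nat.mod_lt _ hn
    rw [primes_split hn hilt, primes_succ_split hn hilt]
    congr 1
    by_cases h : (Nat.succ j + k) % l.length < k % l.length
    · simp [h, Nat.le_of_lt h]
    · have h2 : ¬ (Nat.succ j + k) % l.length ≤ k % l.length := by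
        rcases Nat.lt_or_ge (k % l.length) ((Nat.succ j + k) % l.length) with h3 | h3
        · omega
        · exact absurd (by omega) hne
      simp [h, h2]
  · -- the element wrapped to the back gains one prime
    have e1 : m + (k + 1) = l.length + k := by omega
    rw [← hm, e1, Nat.add_mod_left]
    have hilt : k % l.length < l.length := Nat.mod_lt _ hn
    rw [Nat.zero_add, primes_split hn hilt, primes_succ_split hn hilt]
    have h1 : ¬ (k % l.length < k % l.length) := by omega
    have h2 : k % l.length ≤ k % l.length := le_refl _
    simp only [h1, h2, if_false, if_true]
    have hrep : List.replicate (k / l.length + 1) '\'' =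
        List.replicate (k / l.length + 0) '\'' ++ ['\''] := by
      simp [List.replicate_succ']
    rw [hrep, String.ofList_append, String.append_assoc]

theorem iterate_aStep (l : List String) (k : ℕ) (hl : l ≠ []) :
    aStep^[k] l = gOut l k := by
  induction k with
  | zero => simp [gOut_zero]
  | succ k ih =>
    rw [Function.iterate_succ_apply', ih, aStep_gOut l k hl]

theorem alt_eq_gOut (notes : List String) (inversion : Int)
    (hl : notes ≠ []) (hpos : 0 < inversion) :
    make_inversion_alt notes inversion = gOut notes inversion.toNat := by
  have hn : 0 < notes.length := List.length_pos_of_ne_nil hl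
  unfold make_inversion_alt gOut
  rw [if_neg (show ¬((notes.length : Int) = 0 ∨ inversion ≤ 0) by rintro (h | h) <;> omega)]
  rw [PySem.List.pyRange_one]
  simp only [sub_zero, Int.toNat_natCast, List.map_map]
  apply List.map_congr_left
  intro j hj
  have hj' : j < notes.length := List.mem_range.mp hj
  simp only [Function.comp]
  have e1 : (0 : Int) + (j : Int) + inversion = ((j + inversion.toNat : ℕ) : Int) := by
    push_cast; omega
  rw [e1, PySem.Int.mod_natCast]
  set i' := (j + inversion.toNat) % notes.length with hidef
  have hilt : i' < notes.length := Nat.mod_lt _ hn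
  have e2 : inversion - ((i' : ℕ) : Int) + (notes.length : Int) - 1
      = ((inversion.toNat + notes.length - 1 - i' : ℕ) : Int) := by omega
  rw [e2, PySem.Int.floordiv_natCast]
  rw [PySem.List.pyGetD_natCast]
  congr 1
  rw [PySem.List.pyRepeat_singleton, Int.toNat_natCast]

theorem a_eq_iterate (notes : List String) (inversion : Int)
    (hl : notes ≠ []) (hpos : 0 < inversion) :
    make_inversion notes inversion = aStep^[inversion.toNat] notes := by
  unfold make_inversion
  rw [if_neg hl, if_neg (by omega)]
  rw [foldl_const]
  congr 1
  rw [PySem.List.length_pyRange_one]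
  omega

-- ===== VERDICT (by name: the statement is the Claim_ definition above) =====
theorem make_inversion_spec : Claim_equal_make_inversion := by
  intro notes inversion _
  unfold Spec_make_inversion
  by_cases hl : notes = []
  · subst hl
    simp [make_inversion, make_inversion_alt]
  · by_cases hpos : 0 < inversion
    · rw [a_eq_iterate notes inversion hl hpos,
          iterate_aStep notes inversion.toNat hl,
          alt_eq_gOut notes inversion hl hpos]
    · -- inversion ≤ 0: A's range is empty (or the ==0 branch), B returns notes
      unfold make_inversion make_inversion_alt
      rw [if_neg hl]
      have hle : inversion ≤ 0 := by omega
      rw [if_pos (Or.inr hle)]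
      by_cases h0 : inversion = 0
      · rw [if_pos h0]
      · rw [if_neg h0, PySem.List.pyRange_one_eq_nil (by omega)]
        rfl
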